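-- pv_equiv track=rewrite | github.com/dnwls16071/Programmers_CodingTest | 프로그래머스/unrated/181923. 수열과 구간 쿼리 2/수열과 구간 쿼리 2.py | solution
-- ===== SOURCE A (Python) =====
-- def solution(arr, queries):
--     answer = []
--     for query in queries:
--         left = query[0]
--         right = query[1]
--         k = query[2]
--
--         # 쿼리마다 최소값을 찾기 위해 None으로 초기화 > 매우 중요함
--         min_val = None
--
--         for i in range(left, right+1):
--             if arr[i] > k:  # 모든 i에 대해 k보다 크다
--                 if min_val is None or arr[i] < min_val:
--                     min_val = arr[i]
--
--         if min_val is not None: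
--             answer.append(min_val)
--         else:
--             answer.append(-1)
--     return answer
-- ===== SOURCE B (Python) =====
-- def solution(arr, queries):
--     # indices of arr sorted by value: per query, the first index inside the
--     # window whose value exceeds k carries the window's minimum such value
--     order = sorted(range(len(arr)), key=lambda i: arr[i])
--     answer = []
--     for query in queries:
--         left, right, k = query[0], query[1], query[2]
--         res = -1
--         for i in order:
--             if left <= i <= right and arr[i] > k:
--                 res = arr[i]
--                 break
--         answer.append(res)
--     return answer
-- ===== Notes on version B (the rewrite author's own statement) =====
-- stated objective: alternative
-- what changed: B replaces A's per-query running-minimum scan of the window by one global preprocessing step (indices sorted by value) plus a per-query first-match scan of that sorted order, whose first hit inside the window is the answer.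
-- outside the precondition, e.g. on solution([10, 20], [[-2, 0, 15]]): A returns [20], B returns [-1]
import Mathlib
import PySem

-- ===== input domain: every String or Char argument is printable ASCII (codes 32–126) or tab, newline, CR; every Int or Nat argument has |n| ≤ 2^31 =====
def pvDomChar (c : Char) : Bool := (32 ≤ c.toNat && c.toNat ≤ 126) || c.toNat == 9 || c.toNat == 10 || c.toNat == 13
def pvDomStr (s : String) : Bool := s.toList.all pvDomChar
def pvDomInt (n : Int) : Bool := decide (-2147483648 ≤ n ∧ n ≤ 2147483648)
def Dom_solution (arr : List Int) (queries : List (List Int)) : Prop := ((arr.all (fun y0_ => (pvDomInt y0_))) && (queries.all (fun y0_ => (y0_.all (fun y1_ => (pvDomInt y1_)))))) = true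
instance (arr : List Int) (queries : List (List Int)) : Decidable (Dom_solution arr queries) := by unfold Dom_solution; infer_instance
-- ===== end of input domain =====

-- B precomputes the indices sorted by value once and answers each query by the first index
-- falling in the window with value > k, instead of A's full window scan per query.

-- ===== PORT A =====
-- A's inner-loop body: running minimum of window values exceeding k
def aInner (arr : List Int) (k : Int) (mv : Option Int) (i : Int) : Option Int :=
  let x := PySem.List.pyGetD arr i 0
  if x > k then
    match mv with
    | none => some x
    | some m => if x < m then some x else some m
  else mv

def solution (arr : List Int) (queries : List (List Int)) : List Int :=
  queries.foldl (fun answer query =>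
    let left := PySem.List.pyGetD query 0 0
    let right := PySem.List.pyGetD query 1 0
    let k := PySem.List.pyGetD query 2 0
    let minval := (PySem.List.pyRange left (right + 1) 1).foldl (aInner arr k) none
    answer ++ [match minval with | some m => m | none => -1]) []

-- ===== PORT B =====
-- B's per-query loop: first index (in value-sorted order) inside [l,r] with value > k
def bFind (arr : List Int) (l r k : Int) (order : List Int) : Int :=
  match order.find? (fun i => decide (l ≤ i) && decide (i ≤ r) && decide (k < PySem.List.pyGetD arr i 0)) with
  | some i => PySem.List.pyGetD arr i 0
  | none => -1

def solution_alt (arr : List Int) (queries : List (List Int)) : List Int :=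
  let order := PySem.List.sorted (PySem.List.pyRange 0 (arr.length : Int) 1)
                 (fun i => PySem.List.pyGetD arr i 0) false
  queries.foldl (fun answer query =>
    answer ++ [bFind arr (PySem.List.pyGetD query 0 0) (PySem.List.pyGetD query 1 0)
                 (PySem.List.pyGetD query 2 0) order]) []

-- ===== PRECONDITION & SPEC =====
-- Pre_ restricts queries to the problem's natural domain (length ≥ 3, 0 ≤ left, and right < len(arr)
-- whenever left ≤ right): outside it A either raises IndexError (short query, out-of-range access)
-- or, for a negative left index, returns a value produced by Python's accidental negative-index
-- wraparound, which is outside the task's stated 0 ≤ l ≤ r < n domain.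
def Pre_solution (arr : List Int) (queries : List (List Int)) : Prop :=
  ∀ q ∈ queries, 3 ≤ q.length ∧ 0 ≤ PySem.List.pyGetD q 0 0 ∧
    (PySem.List.pyGetD q 0 0 ≤ PySem.List.pyGetD q 1 0 →
      PySem.List.pyGetD q 1 0 < (arr.length : Int))
instance (arr : List Int) (queries : List (List Int)) : Decidable (Pre_solution arr queries) := by
  unfold Pre_solution; infer_instance

def pvWitness_solution : List Int × List (List Int) := ([1, 2, 3], [[0, 2, 1], [1, 0, 0]])

def Spec_solution (arr : List Int) (queries : List (List Int)) (out : List Int) : Prop := out = solution_alt arr queries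
instance (arr : List Int) (queries : List (List Int)) (out : List Int) : Decidable (Spec_solution arr queries out) := by unfold Spec_solution; infer_instance

-- ===== CLAIM (what is proved, stated in full; the proofs are below) =====
def Claim_equal_solution : Prop := ∀ (arr : List Int) (queries : List (List Int)), Dom_solution arr queries → Pre_solution arr queries → Spec_solution arr queries (solution arr queries)

-- ===== LEMMAS AND PROOFS =====

-- the filtered window values A minimises over
def valsOf (arr : List Int) (k : Int) (idxs : List Int) : List Int :=
  (idxs.map (fun i => PySem.List.pyGetD arr i 0)).filter (fun x => decide (k < x))

def mcomb (acc : Option Int) (x : Int) : Option Int :=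
  match acc with | none => some x | some m => some (min m x)

theorem foldA_eq (arr : List Int) (k : Int) :
    ∀ (idxs : List Int) (acc : Option Int),
      idxs.foldl (aInner arr k) acc = (valsOf arr k idxs).foldl mcomb acc := by
  intro idxs
  induction idxs with
  | nil => intro acc; simp [valsOf]
  | cons i t ih =>
    intro acc
    simp only [List.foldl_cons, valsOf, List.map_cons, List.filter_cons]
    by_cases hx : k < PySem.List.pyGetD arr i 0
    · have : aInner arr k acc i = mcomb acc (PySem.List.pyGetD arr i 0) := by
        simp only [aInner, mcomb]
        cases acc with
        | none => simp [hx]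
        | some m =>
          simp only [if_pos hx]
          rcases lt_or_ge (PySem.List.pyGetD arr i 0) m with h | h
          · simp [h, min_eq_right (le_of_lt h)]
          · simp [not_lt.mpr h, min_eq_left h]
      simp only [hx, decide_true, if_true, List.foldl_cons, this]
      exact ih _
    · have : aInner arr k acc i = acc := by simp [aInner, not_lt.mp (by exact fun h => hx h)]
      simp only [hx, decide_false, this]
      exact ih acc
  -- note: branch structure matches A's

theorem mcomb_spec : ∀ (vs : List Int) (m0 : Int),
    ∃ m, vs.foldl mcomb (some m0) = some m ∧ (m = m0 ∨ m ∈ vs) ∧ m ≤ m0 ∧ ∀ x ∈ vs, m ≤ x := by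
  intro vs
  induction vs with
  | nil => intro m0; exact ⟨m0, rfl, Or.inl rfl, le_refl _, by simp⟩
  | cons v t ih =>
    intro m0
    obtain ⟨m, hfold, hmem, hle, hall⟩ := ih (min m0 v)
    refine ⟨m, by simpa [mcomb] using hfold, ?_, le_trans hle (min_le_left _ _), ?_⟩
    · rcases hmem with h | h
      · rcases le_total m0 v with hc | hc
        · exact Or.inl (by rw [h, min_eq_left hc])
        · exact Or.inr (by simp [h, min_eq_right hc])
      · exact Or.inr (List.mem_cons_of_mem _ h)
    · intro x hx
      rcases List.mem_cons.mp hx with rfl | hx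
      · exact le_trans hle (min_le_right _ _)
      · exact hall x hx

theorem mcomb_none_spec (vs : List Int) :
    (vs = [] ∧ vs.foldl mcomb none = none) ∨
    ∃ m, vs.foldl mcomb none = some m ∧ m ∈ vs ∧ ∀ x ∈ vs, m ≤ x := by
  cases vs with
  | nil => exact Or.inl ⟨rfl, rfl⟩
  | cons v t =>
    obtain ⟨m, hfold, hmem, hle, hall⟩ := mcomb_spec t v
    refine Or.inr ⟨m, by simpa [mcomb] using hfold, ?_, ?_⟩
    · rcases hmem with rfl | h
      · exact List.mem_cons_self
      · exact List.mem_cons_of_mem _ h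
    · intro x hx
      rcases List.mem_cons.mp hx with rfl | hx
      · exact hle
      · exact hall x hx

-- first match in a key-sorted list is key-minimal among matches
theorem find?_sorted_min {ys : List Int} {key : Int → Int}
    (hs : ys.Pairwise (fun a b => key a ≤ key b)) {p : Int → Bool} {i : Int}
    (hf : ys.find? p = some i) : ∀ j ∈ ys, p j → key i ≤ key j := by
  induction ys with
  | nil => simp at hf
  | cons y t ih =>
    rcases List.pairwise_cons.mp hs with ⟨hy, ht⟩
    by_cases hp : p y
    · rw [List.find?_cons_of_pos hp] at hf
      cases hf
      intro j hj _
      rcases List.mem_cons.mp hj with rfl | hj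
      · exact le_refl _
      · exact hy j hj
    · rw [List.find?_cons_of_neg hp] at hf
      intro j hj hpj
      rcases List.mem_cons.mp hj with rfl | hj
      · exact absurd hpj hp
      · exact ih ht hf j hj hpj

theorem mem_valsOf {arr : List Int} {k l r x : Int} :
    x ∈ valsOf arr k (PySem.List.pyRange l (r + 1) 1) ↔
      ∃ j, l ≤ j ∧ j ≤ r ∧ PySem.List.pyGetD arr j 0 = x ∧ k < x := by
  simp only [valsOf, List.mem_filter, List.mem_map, PySem.List.mem_pyRange_one, decide_eq_true_eq]
  constructor
  · rintro ⟨⟨j, ⟨hj1, hj2⟩, rfl⟩, hk⟩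
    exact ⟨j, hj1, by omega, rfl, hk⟩
  · rintro ⟨j, hj1, hj2, rfl, hk⟩
    exact ⟨⟨j, ⟨hj1, by omega⟩, rfl⟩, hk⟩

-- the per-query equivalence
theorem query_eq (arr : List Int) (l r k : Int) (hl : 0 ≤ l)
    (hr : l ≤ r → r < (arr.length : Int)) :
    (match (PySem.List.pyRange l (r + 1) 1).foldl (aInner arr k) none with
      | some m => m | none => -1) =
    bFind arr l r k (PySem.List.sorted (PySem.List.pyRange 0 (arr.length : Int) 1)
      (fun i => PySem.List.pyGetD arr i 0) false) := by
  set order := PySem.List.sorted (PySem.List.pyRange 0 (arr.length : Int) 1)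
      (fun i => PySem.List.pyGetD arr i 0) false with horder
  have hmemord : ∀ j : Int, j ∈ order ↔ 0 ≤ j ∧ j < (arr.length : Int) := by
    intro j
    rw [horder, PySem.List.mem_sorted, PySem.List.mem_pyRange_one]
  have hsorted : order.Pairwise (fun a b => PySem.List.pyGetD arr a 0 ≤ PySem.List.pyGetD arr b 0) :=
    PySem.List.sorted_pairwise _ _
  rw [foldA_eq]
  set p : Int → Bool := fun i => decide (l ≤ i) && decide (i ≤ r) && decide (k < PySem.List.pyGetD arr i 0) with hp
  have hpiff : ∀ i, p i = true ↔ l ≤ i ∧ i ≤ r ∧ k < PySem.List.pyGetD arr i 0 := by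
    intro i; simp [hp, and_assoc]
  unfold bFind
  cases hf : order.find? p with
  | none =>
    have hnone : ∀ j ∈ order, ¬ p j := by
      intro j hj; exact List.find?_eq_none.mp hf j hj
    have hvals : valsOf arr k (PySem.List.pyRange l (r + 1) 1) = [] := by
      rw [List.eq_nil_iff_forall_not_mem]
      intro x hx
      obtain ⟨j, hj1, hj2, hjx, hk⟩ := mem_valsOf.mp hx
      have hjord : j ∈ order := (hmemord j).mpr ⟨le_trans hl hj1, lt_of_le_of_lt hj2 (hr (le_trans hj1 hj2))⟩
      exact hnone j hjord ((hpiff j).mpr ⟨hj1, hj2, by rw [hjx]; exact hk⟩)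
    rw [hvals]
    rfl
  | some i =>
    have hpi := (hpiff i).mp (List.find?_some hf)
    have himem := List.mem_of_find?_eq_some hf
    obtain ⟨hli, hir, hki⟩ := hpi
    have hxin : PySem.List.pyGetD arr i 0 ∈ valsOf arr k (PySem.List.pyRange l (r + 1) 1) :=
      mem_valsOf.mpr ⟨i, hli, hir, rfl, hki⟩
    rcases mcomb_none_spec (valsOf arr k (PySem.List.pyRange l (r + 1) 1)) with ⟨hnil, _⟩ | ⟨m, hfold, hmmem, hmin⟩
    · rw [hnil] at hxin; simp at hxin
    · rw [hfold]
      obtain ⟨j, hj1, hj2, hjm, hkm⟩ := mem_valsOf.mp hmmem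
      have hjord : j ∈ order := (hmemord j).mpr ⟨le_trans hl hj1, lt_of_le_of_lt hj2 (hr (le_trans hj1 hj2))⟩
      have h1 : PySem.List.pyGetD arr i 0 ≤ m := by
        have := find?_sorted_min hsorted hf j hjord ((hpiff j).mpr ⟨hj1, hj2, by rw [hjm]; exact hkm⟩)
        rw [hjm] at this; exact this
      have h2 : m ≤ PySem.List.pyGetD arr i 0 := hmin _ hxin
      simp [le_antisymm h2 h1]

-- ===== VERDICT (by name: the statement is the Claim_ definition above) =====
theorem solution_spec : Claim_equal_solution := by
  intro arr queries _ hpre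
  unfold Spec_solution solution solution_alt
  rw [PySem.List.foldl_append_singleton_eq_map, PySem.List.foldl_append_singleton_eq_map]
  apply List.map_congr_left
  intro q hq
  obtain ⟨_, hl, hr⟩ := hpre q hq
  exact query_eq arr _ _ _ hl hr
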